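-- pv_equiv track=rewrite | github.com/Teolabar03/GdrBattlemap | GdrBattlemap.py | try_hex_to_rgb
-- ===== SOURCE A (Python) =====
-- def try_hex_to_rgb(hex_str):
--     """Try to convert HEX string to RGB tuple"""
--     hex_str = hex_str.strip("#")
--     try:
--         if len(hex_str) == 3:
--             return tuple(int(c*2, 16) for c in hex_str)
--         elif len(hex_str) == 6:
--             return tuple(int(hex_str[i:i+2], 16) for i in (0, 2, 4))
--     except ValueError:
--         return None
--     return None
-- ===== SOURCE B (Python) =====
-- def try_hex_to_rgb(hex_str):
--     """Try to convert HEX string to RGB tuple"""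
--     s = hex_str.strip("#")
--     n = len(s)
--     if n != 3 and n != 6:
--         return None
--     step = n // 3
--     scale = 17 if step == 1 else 1
--     vals = []
--     try:
--         while s:
--             vals.append(scale * int(s[:step], 16))
--             s = s[step:]
--     except ValueError:
--         return None
--     return tuple(vals)
-- ===== Notes on version B (the rewrite author's own statement) =====
-- stated objective: alternative
-- what changed: Instead of two per-branch comprehensions with string slicing/char doubling, B runs one uniform consuming while-loop that eats the stripped string step=len//3 characters at a time and scales single hex digits by 17 (int(c*2,16) == 17*int(c,16)) rather than doubling characters.
import Mathlib
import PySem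

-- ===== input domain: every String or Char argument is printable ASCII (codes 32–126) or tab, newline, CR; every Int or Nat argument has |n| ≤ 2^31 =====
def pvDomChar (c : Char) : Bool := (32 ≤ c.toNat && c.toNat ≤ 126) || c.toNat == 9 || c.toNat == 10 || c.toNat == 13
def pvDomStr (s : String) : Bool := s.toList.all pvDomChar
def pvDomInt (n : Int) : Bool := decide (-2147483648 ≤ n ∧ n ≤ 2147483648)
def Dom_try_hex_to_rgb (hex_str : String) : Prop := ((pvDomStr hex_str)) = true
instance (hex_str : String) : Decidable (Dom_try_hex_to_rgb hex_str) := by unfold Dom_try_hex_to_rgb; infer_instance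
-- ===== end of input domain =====

-- B replaces A's two per-branch parsing comprehensions by one uniform consuming loop that eats the
-- string `step` characters at a time (step = len//3), scaling single digits by 17 (= int(cc,16)
-- for a hex digit c) instead of doubling characters. Same return value everywhere; objective: alternative.

-- ===== PORT A =====
-- A: strip '#'; if len 3, parse each char doubled; elif len 6, parse the three slices; ValueError → None.
def try_hex_to_rgb (hex_str : String) : Option (Int × Int × Int) :=
  let s := (PySem.Str.stripChars hex_str "#").toList
  if s.length = 3 then
    match s with
    | [a, b, c] =>
      -- tuple(int(c*2, 16) for c in hex_str); a ValueError from any element gives None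
      match PySem.Int.ofCharsBase? [a, a] 16, PySem.Int.ofCharsBase? [b, b] 16,
            PySem.Int.ofCharsBase? [c, c] 16 with
      | some x, some y, some z => some (x, y, z)
      | _, _, _ => none
    | _ => none  -- unreachable: s.length = 3
  else if s.length = 6 then
    -- tuple(int(hex_str[i:i+2], 16) for i in (0, 2, 4))
    match PySem.Int.ofCharsBase? (PySem.Chars.slice s (some 0) (some 2)) 16,
          PySem.Int.ofCharsBase? (PySem.Chars.slice s (some 2) (some 4)) 16,
          PySem.Int.ofCharsBase? (PySem.Chars.slice s (some 4) (some 6)) 16 with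
    | some x, some y, some z => some (x, y, z)
    | _, _, _ => none
  else none

-- ===== PORT B =====
-- the `while s:` loop of Source B: eat `step` chars at a time, int(s[:step],16) each chunk, scale it;
-- a ValueError anywhere makes the whole loop answer None. The step = 0 branch is a totality guard
-- only (Source B reaches the loop with step ∈ {1, 2}).
def pvParsePairs (scale : Int) (step : Nat) (s : List Char) : Option (List Int) :=
  if hnil : s = [] then some []
  else if hstep : step = 0 then none
  else
    (PySem.Int.ofCharsBase? (PySem.List.slice s none (some step)) 16).bind fun v =>
      (pvParsePairs scale step (PySem.List.slice s (some step) none)).map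
        (fun vs => scale * v :: vs)
termination_by s.length
decreasing_by
  simp only [PySem.List.slice_from_natCast, List.length_drop]
  have hl : s.length ≠ 0 := fun h => hnil (List.eq_nil_of_length_eq_zero h)
  omega

def try_hex_to_rgb_alt (hex_str : String) : Option (Int × Int × Int) :=
  let s := (PySem.Str.stripChars hex_str "#").toList
  let n := s.length
  if n ≠ 3 ∧ n ≠ 6 then none
  else
    let step := n / 3
    let scale : Int := if step = 1 then 17 else 1
    (pvParsePairs scale step s).bind fun vs =>
      -- tuple(vals): unpack the three collected values (always exactly three when n ∈ {3, 6});
      -- written with List.casesOn (not `match`) so B's port shares no match-compiler auxiliary with A's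
      vs.casesOn none fun r rest =>
        rest.casesOn none fun g rest' =>
          rest'.casesOn none fun b rest'' =>
            rest''.casesOn (some (r, g, b)) fun _ _ => none

-- ===== PRECONDITION & SPEC =====
def Spec_try_hex_to_rgb (hex_str : String) (out : Option (Int × Int × Int)) : Prop := out = try_hex_to_rgb_alt hex_str
instance (hex_str : String) (out : Option (Int × Int × Int)) : Decidable (Spec_try_hex_to_rgb hex_str out) := by unfold Spec_try_hex_to_rgb; infer_instance

-- ===== CLAIM (what is proved, stated in full; the proofs are below) =====
def Claim_equal_try_hex_to_rgb : Prop := ∀ (hex_str : String), Dom_try_hex_to_rgb hex_str → Spec_try_hex_to_rgb hex_str (try_hex_to_rgb hex_str)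

-- ===== LEMMAS AND PROOFS =====

-- int(c+c, 16) = 17 * int(c, 16) for every domain character c (both raise together otherwise)
lemma pv_pair_single (c : Char) (h : pvDomChar c = true) :
    PySem.Int.ofCharsBase? [c, c] 16 = (PySem.Int.ofCharsBase? [c] 16).map (fun v => 17 * v) := by
  have hn : c.toNat < 128 := by
    unfold pvDomChar at h
    simp only [Bool.or_eq_true, Bool.and_eq_true, decide_eq_true_eq, beq_iff_eq] at h
    omega
  have key : ∀ n < 128, PySem.Int.ofCharsBase? [Char.ofNat n, Char.ofNat n] 16 =
      (PySem.Int.ofCharsBase? [Char.ofNat n] 16).map (fun v => 17 * v) := by decide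
  have := key c.toNat hn
  rwa [Char.ofNat_toNat] at this

lemma pv_mem_stripChars (l chs : List Char) (c : Char) (hc : c ∈ PySem.Chars.stripChars l chs) :
    c ∈ l := by
  unfold PySem.Chars.stripChars at hc
  rw [List.mem_reverse] at hc
  have h1 := (List.dropWhile_sublist _).mem hc
  rw [List.mem_reverse] at h1
  exact (List.dropWhile_sublist _).mem h1


lemma pvParsePairs_nil (scale : Int) (step : Nat) : pvParsePairs scale step [] = some [] := by
  rw [pvParsePairs.eq_def]; simp

lemma pvParsePairs_ne (scale : Int) (step : Nat) (s : List Char) (h : s ≠ []) (h2 : step ≠ 0) :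
    pvParsePairs scale step s =
      (PySem.Int.ofCharsBase? (s.take step) 16).bind fun v =>
        (pvParsePairs scale step (s.drop step)).map (fun vs => scale * v :: vs) := by
  conv_lhs => rw [pvParsePairs.eq_def]
  simp [h, h2, PySem.List.slice_to_natCast, PySem.List.slice_from_natCast]

lemma pv_run3 (sc : Int) (a b c : Char) :
    pvParsePairs sc 1 [a, b, c] =
      match PySem.Int.ofCharsBase? [a] 16, PySem.Int.ofCharsBase? [b] 16,
            PySem.Int.ofCharsBase? [c] 16 with
      | some x, some y, some z => some [sc * x, sc * y, sc * z]
      | _, _, _ => none := by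
  rw [pvParsePairs_ne _ _ _ (by simp) (by simp)]
  have t1 : List.take 1 [a, b, c] = [a] := rfl
  have d1 : List.drop 1 [a, b, c] = [b, c] := rfl
  rw [t1, d1, pvParsePairs_ne _ _ _ (by simp) (by simp)]
  have t2 : List.take 1 [b, c] = [b] := rfl
  have d2 : List.drop 1 [b, c] = [c] := rfl
  rw [t2, d2, pvParsePairs_ne _ _ _ (by simp) (by simp)]
  have t3 : List.take 1 [c] = [c] := rfl
  have d3 : List.drop 1 [c] = ([] : List Char) := rfl
  rw [t3, d3, pvParsePairs_nil]
  rcases PySem.Int.ofCharsBase? [a] 16 <;> rcases PySem.Int.ofCharsBase? [b] 16 <;>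
    rcases PySem.Int.ofCharsBase? [c] 16 <;> rfl

lemma pv_run6 (sc : Int) (a b c d e f : Char) :
    pvParsePairs sc 2 [a, b, c, d, e, f] =
      match PySem.Int.ofCharsBase? [a, b] 16, PySem.Int.ofCharsBase? [c, d] 16,
            PySem.Int.ofCharsBase? [e, f] 16 with
      | some x, some y, some z => some [sc * x, sc * y, sc * z]
      | _, _, _ => none := by
  rw [pvParsePairs_ne _ _ _ (by simp) (by simp)]
  have t1 : List.take 2 [a, b, c, d, e, f] = [a, b] := rfl
  have d1 : List.drop 2 [a, b, c, d, e, f] = [c, d, e, f] := rfl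
  rw [t1, d1, pvParsePairs_ne _ _ _ (by simp) (by simp)]
  have t2 : List.take 2 [c, d, e, f] = [c, d] := rfl
  have d2 : List.drop 2 [c, d, e, f] = [e, f] := rfl
  rw [t2, d2, pvParsePairs_ne _ _ _ (by simp) (by simp)]
  have t3 : List.take 2 [e, f] = [e, f] := rfl
  have d3 : List.drop 2 [e, f] = ([] : List Char) := rfl
  rw [t3, d3, pvParsePairs_nil]
  rcases PySem.Int.ofCharsBase? [a, b] 16 <;> rcases PySem.Int.ofCharsBase? [c, d] 16 <;>
    rcases PySem.Int.ofCharsBase? [e, f] 16 <;> rfl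

-- ===== VERDICT (by name: the statement is the Claim_ definition above) =====
theorem try_hex_to_rgb_spec : Claim_equal_try_hex_to_rgb := by
  intro hex_str hdom
  unfold Spec_try_hex_to_rgb try_hex_to_rgb try_hex_to_rgb_alt
  have hmem : ∀ c ∈ (PySem.Str.stripChars hex_str "#").toList, pvDomChar c = true := by
    intro c hc
    rw [PySem.Str.toList_stripChars] at hc
    have := pv_mem_stripChars _ _ _ hc
    exact List.all_eq_true.mp hdom c this
  generalize hS : (PySem.Str.stripChars hex_str "#").toList = s at hmem
  by_cases h3 : s.length = 3
  · match s, h3, hmem with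
    | [a, b, c], _, hmem =>
      have ha := pv_pair_single a (hmem a (by simp))
      have hb := pv_pair_single b (hmem b (by simp))
      have hc := pv_pair_single c (hmem c (by simp))
      simp only [List.length_cons, List.length_nil]
      norm_num
      rw [ha, hb, hc, pv_run3]
      rcases PySem.Int.ofCharsBase? [a] 16 <;> rcases PySem.Int.ofCharsBase? [b] 16 <;>
        rcases PySem.Int.ofCharsBase? [c] 16 <;> rfl
  · by_cases h6 : s.length = 6
    · match s, h6 with
      | [a, b, c, d, e, f], _ =>
        simp only [List.length_cons, List.length_nil, PySem.Chars.slice_eq_listSlice]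
        norm_num
        have e0 : PySem.List.slice [a, b, c, d, e, f] none (some 2) = [a, b] := rfl
        have e2 : PySem.List.slice [a, b, c, d, e, f] (some 2) (some 4) = [c, d] := rfl
        have e4 : PySem.List.slice [a, b, c, d, e, f] (some 4) (some 6) = [e, f] := rfl
        rw [e0, e2, e4, pv_run6]
        rcases PySem.Int.ofCharsBase? [a, b] 16 <;> rcases PySem.Int.ofCharsBase? [c, d] 16 <;>
          rcases PySem.Int.ofCharsBase? [e, f] 16 <;> simp
    · simp [h3, h6]
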